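-- pv_equiv track=rewrite | github.com/abitabir/ScaleyStuffs | miscellaneous/Citrix/Actual/question2.py | updateTimes
-- ===== SOURCE A (Python) =====
-- def updateTimes(signalOne, signalTwo):
--     maxequal = None
--     updated_count = 0
--     minSignal = signalOne if len(signalOne) > len(signalTwo) else signalTwo
--     for time_index in range(len(minSignal)):
--         if signalOne[time_index] == signalTwo[time_index]:
--             if maxequal is not None:
--                 if signalOne[time_index] > maxequal:
--                     maxequal = signalOne[time_index]
--                     updated_count += 1
--             else:
--                 maxequal = signalOne[time_index]
--                 updated_count += 1
--     return updated_count
-- ===== SOURCE B (Python) =====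
-- def updateTimes(signalOne, signalTwo):
--     matched = [a for a, b in zip(signalOne, signalTwo) if a == b]
--     return sum(1 for i, v in enumerate(matched) if all(u < v for u in matched[:i]))
-- ===== Notes on version B (the rewrite author's own statement) =====
-- stated objective: simpler
-- what changed: B first collects the equal-valued matches in one zip pass, then counts an element as a record iff it is strictly greater than every earlier match (no running-maximum state); A interleaves index-based matching with a running maximum in a single loop.
-- crash fix: On signals of unequal length A raises IndexError (it iterates over the longer signal's indices and indexes the shorter); B's zip truncates and it returns the record count of the common prefix. — e.g. on updateTimes([1], []): A raises IndexError, B returns 0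
import Mathlib
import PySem

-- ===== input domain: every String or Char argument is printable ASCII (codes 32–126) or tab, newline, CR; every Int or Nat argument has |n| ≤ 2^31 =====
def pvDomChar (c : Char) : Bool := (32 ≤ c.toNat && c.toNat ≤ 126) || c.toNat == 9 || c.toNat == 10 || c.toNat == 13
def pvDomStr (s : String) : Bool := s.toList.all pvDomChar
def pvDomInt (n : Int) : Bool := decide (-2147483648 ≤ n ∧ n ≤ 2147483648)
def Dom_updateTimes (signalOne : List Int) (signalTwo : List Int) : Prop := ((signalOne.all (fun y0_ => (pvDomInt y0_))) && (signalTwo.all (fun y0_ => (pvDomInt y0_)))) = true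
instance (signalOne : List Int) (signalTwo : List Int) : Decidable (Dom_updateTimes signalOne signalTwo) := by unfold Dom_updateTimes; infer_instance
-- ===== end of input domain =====

-- B splits A's single stateful loop into two passes: collect the equal-valued matches, then
-- count the elements strictly greater than every earlier match (objective: simpler decomposition).

-- ===== PORT A =====
-- one loop step of A: index both signals, on a match update the running maximum / count
def stepA (signalOne signalTwo : List Int) (st : Option Int × Int) (i : Int) : Option Int × Int :=
  match PySem.List.pyGet? signalOne i, PySem.List.pyGet? signalTwo i with
  | some a, some b =>
    if a == b then
      match st.1 with
      | some m => if a > m then (some a, st.2 + 1) else st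
      | none => (some a, st.2 + 1)
    else st
  | _, _ => st  -- Python raises IndexError here (only reachable on unequal lengths, outside Pre_)

def updateTimes (signalOne : List Int) (signalTwo : List Int) : Int :=
  let minSignal := if signalOne.length > signalTwo.length then signalOne else signalTwo
  ((PySem.List.pyRange 0 (minSignal.length : Int) 1).foldl (stepA signalOne signalTwo)
    ((none : Option Int), (0 : Int))).2

-- ===== PORT B =====
def updateTimes_alt (signalOne : List Int) (signalTwo : List Int) : Int :=
  let matched := (signalOne.zip signalTwo).filterMap (fun p => if p.1 == p.2 then some p.1 else none)
  -- matched[:i] for the nonnegative enumerate index i is take i.toNat (exact here)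
  ((PySem.List.enumerate matched 0).filter
    (fun p => (matched.take p.1.toNat).all (fun u => u < p.2))).length

-- ===== PRECONDITION & SPEC =====
-- Pre_ excludes unequal-length signals: A indexes the shorter signal past its end and raises IndexError.
def Pre_updateTimes (signalOne : List Int) (signalTwo : List Int) : Prop :=
  signalOne.length = signalTwo.length
instance (signalOne : List Int) (signalTwo : List Int) : Decidable (Pre_updateTimes signalOne signalTwo) := by unfold Pre_updateTimes; infer_instance

def pvWitness_updateTimes : List Int × List Int := ([1, 2], [1, 3])

-- On signals of unequal length A raises IndexError; B's zip truncates and returns the record count of the common prefix.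
def Raises_updateTimes (signalOne : List Int) (signalTwo : List Int) : Prop :=
  signalOne.length ≠ signalTwo.length
instance (signalOne : List Int) (signalTwo : List Int) : Decidable (Raises_updateTimes signalOne signalTwo) := by unfold Raises_updateTimes; infer_instance
def pvRaiseWitness_updateTimes : List Int × List Int := ([1], [])
def pvRaiseWitnessOut_updateTimes : Int := 0

def Spec_updateTimes (signalOne : List Int) (signalTwo : List Int) (out : Int) : Prop := out = updateTimes_alt signalOne signalTwo
instance (signalOne : List Int) (signalTwo : List Int) (out : Int) : Decidable (Spec_updateTimes signalOne signalTwo out) := by unfold Spec_updateTimes; infer_instance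

-- ===== CLAIM (what is proved, stated in full; the proofs are below) =====
def Claim_equal_updateTimes : Prop := ∀ (signalOne : List Int) (signalTwo : List Int), Dom_updateTimes signalOne signalTwo → Pre_updateTimes signalOne signalTwo → Spec_updateTimes signalOne signalTwo (updateTimes signalOne signalTwo)
def Claim_raises_updateTimes : Prop := (∀ (signalOne : List Int) (signalTwo : List Int), Dom_updateTimes signalOne signalTwo → Raises_updateTimes signalOne signalTwo → ¬ Pre_updateTimes signalOne signalTwo) ∧ (Dom_updateTimes (pvRaiseWitness_updateTimes.1) (pvRaiseWitness_updateTimes.2) ∧ Raises_updateTimes (pvRaiseWitness_updateTimes.1) (pvRaiseWitness_updateTimes.2) ∧ updateTimes_alt (pvRaiseWitness_updateTimes.1) (pvRaiseWitness_updateTimes.2) = pvRaiseWitnessOut_updateTimes)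

-- ===== LEMMAS AND PROOFS =====

-- A's loop step expressed on a zipped pair
def stepPair (st : Option Int × Int) (p : Int × Int) : Option Int × Int :=
  if p.1 == p.2 then
    match st.1 with
    | some m => if p.1 > m then (some p.1, st.2 + 1) else st
    | none => (some p.1, st.2 + 1)
  else st

-- A's loop step on an already-matched value
def stepRec (st : Option Int × Int) (a : Int) : Option Int × Int :=
  match st.1 with
  | some m => if a > m then (some a, st.2 + 1) else st
  | none => (some a, st.2 + 1)

-- record count of a list, relative to an optional previous maximum
def recA : List Int → Option Int → Int
  | [], _ => 0
  | a :: l, none => 1 + recA l (some a)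
  | a :: l, some m => if a > m then 1 + recA l (some a) else recA l (some m)

def optLt : Option Int → Int → Bool
  | none, _ => true
  | some m, a => decide (m < a)

theorem foldA_eq_foldPair (signalOne signalTwo : List Int)
    (h : signalOne.length = signalTwo.length) (st : Option Int × Int) :
    (PySem.List.pyRange 0 (signalTwo.length : Int) 1).foldl (stepA signalOne signalTwo) st
      = (signalOne.zip signalTwo).foldl stepPair st := by
  have hz : (signalOne.zip signalTwo).length = signalTwo.length := by
    simp [List.length_zip, h]
  have hcast : ((signalTwo.length : Int)) = (((signalOne.zip signalTwo).length : Int)) := by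
    exact_mod_cast hz.symm
  rw [hcast,
    ← PySem.List.foldl_pyRange_zero_pyGetD' (signalOne.zip signalTwo) ((0 : Int), (0 : Int)) stepPair st]
  apply PySem.List.foldl_congr_mem
  intro acc x hx
  obtain ⟨h0, hlt⟩ := (PySem.List.mem_pyRange_one).1 hx
  have e1 : ((signalOne.zip signalTwo).length : Int) = (signalOne.length : Int) := by
    exact_mod_cast hz.trans h.symm
  have hx1 : x.toNat < signalOne.length := by omega
  have hx2 : x.toNat < signalTwo.length := by omega
  have hxz : x.toNat < (signalOne.zip signalTwo).length := by omega
  simp only [stepA, stepPair]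
  rw [PySem.List.pyGet?_eq_some_getElem signalOne h0 (by omega),
    PySem.List.pyGet?_eq_some_getElem signalTwo h0 (by omega),
    PySem.List.pyGetD_eq_getElem (signalOne.zip signalTwo) ((0 : Int), (0 : Int)) h0 (by omega)]
  simp [List.getElem_zip]

theorem foldPair_eq_foldRec (l : List (Int × Int)) (st : Option Int × Int) :
    l.foldl stepPair st
      = (l.filterMap (fun p => if p.1 == p.2 then some p.1 else none)).foldl stepRec st := by
  induction l generalizing st with
  | nil => rfl
  | cons p l ih =>
    by_cases hp : p.1 = p.2
    · simp [stepPair, stepRec, hp, ih]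
    · simp [stepPair, hp, ih]

theorem foldRec_eq_recA (l : List Int) (st : Option Int × Int) :
    (l.foldl stepRec st).2 = st.2 + recA l st.1 := by
  induction l generalizing st with
  | nil => simp [recA]
  | cons a l ih =>
    cases hst : st.1 with
    | none =>
      have : stepRec st a = (some a, st.2 + 1) := by simp [stepRec, hst]
      simp [List.foldl_cons, this, ih, recA]; ring
    | some m =>
      by_cases hm : a > m
      · have : stepRec st a = (some a, st.2 + 1) := by simp [stepRec, hst, hm]
        simp [List.foldl_cons, this, ih, recA, hm]
        ring
      · have : stepRec st a = st := by simp [stepRec, hst, hm]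
        simp [List.foldl_cons, this, ih, recA, hm]
        rw [hst]

theorem countB_eq_recA (l : List Int) (pre : List Int) (m : Option Int)
    (h : ∀ a : Int, pre.all (fun u => decide (u < a)) = optLt m a) :
    (((PySem.List.enumerate l (pre.length : Int)).filter
        (fun p => ((pre ++ l).take p.1.toNat).all (fun u => u < p.2))).length : Int)
      = recA l m := by
  induction l generalizing pre m with
  | nil => simp [PySem.List.enumerate_nil, recA]
  | cons a l ih =>
    have hhead : ((pre ++ a :: l).take (((pre.length : Int)).toNat)).all
        (fun u => decide (u < a)) = optLt m a := by
      rw [Int.toNat_natCast, List.take_left]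
      exact h a
    have hlist : pre ++ a :: l = (pre ++ [a]) ++ l := by simp
    have hlen1 : ((pre.length : Int)) + 1 = (((pre ++ [a]).length : Int)) := by simp
    rw [PySem.List.enumerate_cons, List.filter_cons]
    simp only [hhead]
    rw [hlen1, hlist]
    cases m with
    | none =>
      have hall : ∀ x : Int, ((pre ++ [a]).all (fun u => decide (u < x)))
          = optLt (some a) x := by
        intro x
        have hx := h x
        simp [optLt] at hx
        simp [optLt, List.all_append]
        tauto
      have ihx := ih (pre ++ [a]) (some a) hall
      simp only [optLt, if_true]
      rw [List.length_cons]
      push_cast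
      rw [ihx]
      simp [recA]
      ring
    | some mm =>
      have hall : ∀ x : Int, ((pre ++ [a]).all (fun u => decide (u < x)))
          = optLt (some (max mm a)) x := by
        intro x
        have hx := h x
        simp [optLt] at hx
        simp [optLt, List.all_append]
        tauto
      have ihx := ih (pre ++ [a]) (some (max mm a)) hall
      by_cases hm : mm < a
      · have hc : optLt (some mm) a = true := by simp [optLt, hm]
        rw [hc, if_pos rfl, List.length_cons]
        push_cast
        rw [max_eq_right (le_of_lt hm)] at ihx
        rw [ihx]
        simp [recA, hm]
        ring
      · have hc : optLt (some mm) a = false := by simp [optLt, hm]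
        rw [hc]
        simp only [Bool.false_eq_true, if_false]
        rw [max_eq_left (le_of_not_gt hm)] at ihx
        rw [ihx]
        simp [recA, hm]

-- ===== VERDICT (by name: the statement is the Claim_ definition above) =====
theorem updateTimes_spec : Claim_equal_updateTimes := by
  intro s1 s2 _ hpre
  unfold Spec_updateTimes updateTimes updateTimes_alt
  have hpre2 : s1.length = s2.length := hpre
  have hlen : ¬ (s1.length > s2.length) := by omega
  simp only [hlen, if_false]
  rw [foldA_eq_foldPair s1 s2 hpre2, foldPair_eq_foldRec, foldRec_eq_recA]
  have := countB_eq_recA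
    ((s1.zip s2).filterMap (fun p => if p.1 == p.2 then some p.1 else none)) [] none
    (by intro a; simp [optLt])
  simpa using this.symm

def updateTimes_raises : Claim_raises_updateTimes := by
  unfold Claim_raises_updateTimes
  exact ⟨fun _ _ _ h => h, by decide⟩
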